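-- pv_equiv track=rewrite | github.com/ruiqi-zhong/EMNLP23-APEL | sql_util/dbinfo.py | get_primary_keys
-- ===== SOURCE A (Python) =====
-- from typing import Set, List, Tuple, Dict, Any, TypeVar
-- from collections import OrderedDict, defaultdict, Counter
--
-- def get_primary_keys(table_column_properties: Dict[Tuple[str, str], Dict[str, Any]]) -> Dict[str, List[str]]:
--     table_name2primary_keys = OrderedDict()
--     for (table_name, column_name), property in table_column_properties.items():
--         if table_name not in table_name2primary_keys:
--             table_name2primary_keys[table_name] = []
--         if property['PK'] != 0:
--             table_name2primary_keys[table_name].append(column_name)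
--     return table_name2primary_keys
-- ===== SOURCE B (Python) =====
-- from collections import OrderedDict
--
--
-- def get_primary_keys(table_column_properties):
--     # Different strategy: dedupe the table names first, then one nested scan
--     # per table collecting its PK columns (no dict accumulator mutated in a loop).
--     items = list(table_column_properties.items())
--     tables = list(dict.fromkeys(t for (t, _c), _p in items))
--     return OrderedDict(
--         (t, [c for (t2, c), prop in items if t2 == t and prop['PK'] != 0])
--         for t in tables
--     )
-- ===== Notes on version B (the rewrite author's own statement) =====
-- stated objective: alternative
-- what changed: B drops A's mutated dict accumulator entirely: it dedups the table names first (dict.fromkeys), then runs one independent nested scan per table collecting that table's PK column names, trading A's single O(n) dict pass for O(n*t) per-table scans.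
import Mathlib
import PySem

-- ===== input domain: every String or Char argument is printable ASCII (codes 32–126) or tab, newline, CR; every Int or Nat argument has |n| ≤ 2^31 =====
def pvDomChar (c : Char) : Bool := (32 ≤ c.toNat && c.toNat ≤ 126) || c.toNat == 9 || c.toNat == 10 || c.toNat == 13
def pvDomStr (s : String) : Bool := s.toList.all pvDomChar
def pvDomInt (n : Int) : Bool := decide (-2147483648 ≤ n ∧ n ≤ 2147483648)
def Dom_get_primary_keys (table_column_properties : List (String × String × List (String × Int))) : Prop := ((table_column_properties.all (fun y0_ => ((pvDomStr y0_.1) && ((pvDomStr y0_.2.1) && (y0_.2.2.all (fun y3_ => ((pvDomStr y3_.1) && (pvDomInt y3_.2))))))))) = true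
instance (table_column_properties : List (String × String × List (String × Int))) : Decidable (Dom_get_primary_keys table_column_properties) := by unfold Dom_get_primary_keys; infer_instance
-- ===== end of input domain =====

-- B replaces A's single dict-accumulating loop by dedup-then-nested-scan: dedupe the table
-- names first, then collect each table's PK columns with its own scan over all rows; same
-- return value, O(n·t) instead of O(n). Equivalence is about the return value.

-- ===== PORT A =====
-- loop body of A: register the table if unseen, then append the column if its 'PK' property is nonzero;
-- property['PK'] raises KeyError when 'PK' is absent — PySem get? returns none there (excluded by Pre_)
def pvStepA (d : PySem.Dict String (List String)) (row : String × String × List (String × Int)) :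
    PySem.Dict String (List String) :=
  let d1 := if d.contains row.1 then d else d.insert row.1 []
  match (PySem.Dict.ofList row.2.2).get? "PK" with
  | some pk => if pk ≠ 0 then d1.modify row.1 [] (· ++ [row.2.1]) else d1
  | none => d1

def get_primary_keys (table_column_properties : List (String × String × List (String × Int))) :
    List (String × List String) :=
  (table_column_properties.foldl pvStepA PySem.Dict.empty).items

-- ===== PORT B =====
-- B's comprehension condition: t2 == t and prop['PK'] != 0 (short-circuit: 'PK' read only on matching rows)
def pvIsPK (row : String × String × List (String × Int)) : Bool :=
  match (PySem.Dict.ofList row.2.2).get? "PK" with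
  | some pk => pk != 0
  | none => false

def get_primary_keys_alt (table_column_properties : List (String × String × List (String × Int))) :
    List (String × List String) :=
  let items := table_column_properties
  -- tables = list(dict.fromkeys(t for (t, _c), _p in items))
  let tables := PySem.List.dedup (items.map (fun row => row.1))
  -- OrderedDict((t, [c for (t2, c), prop in items if t2 == t and prop['PK'] != 0]) for t in tables)
  (PySem.Dict.ofList (tables.map (fun t =>
      (t, (items.filter (fun row => row.1 == t && pvIsPK row)).map (fun row => row.2.1))))).items

-- ===== PRECONDITION & SPEC =====
-- Pre_ excludes exactly the inputs where a property dict lacks the key 'PK': Python A (and B) raise KeyError there.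
def Pre_get_primary_keys (table_column_properties : List (String × String × List (String × Int))) : Prop :=
  ∀ row ∈ table_column_properties, "PK" ∈ row.2.2.map (·.1)
instance (table_column_properties : List (String × String × List (String × Int))) : Decidable (Pre_get_primary_keys table_column_properties) := by unfold Pre_get_primary_keys; infer_instance

def pvWitness_get_primary_keys : (List (String × String × List (String × Int))) :=
  [("t", "a", [("PK", 1)]), ("t", "b", [("PK", 0)]), ("u", "c", [("PK", 2)])]

def Spec_get_primary_keys (table_column_properties : List (String × String × List (String × Int))) (out : List (String × List String)) : Prop := out = get_primary_keys_alt table_column_properties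
instance (table_column_properties : List (String × String × List (String × Int))) (out : List (String × List String)) : Decidable (Spec_get_primary_keys table_column_properties out) := by unfold Spec_get_primary_keys; infer_instance

-- ===== CLAIM (what is proved, stated in full; the proofs are below) =====
def Claim_equal_get_primary_keys : Prop := ∀ (table_column_properties : List (String × String × List (String × Int))), Dom_get_primary_keys table_column_properties → Pre_get_primary_keys table_column_properties → Spec_get_primary_keys table_column_properties (get_primary_keys table_column_properties)

-- ===== LEMMAS AND PROOFS =====

-- OrderedDict(f(t) for t in l) builds by inserting f's pairs left to right
theorem pv_ofList_map {beta : Type} (f : beta → String × List String) (l : List beta) :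
    PySem.Dict.ofList (l.map f)
      = l.foldl (fun d x => d.insert (f x).1 (f x).2) PySem.Dict.empty := by
  rw [show PySem.Dict.ofList (l.map f)
      = (l.map f).foldl (fun d p => d.insert p.1 p.2) PySem.Dict.empty from rfl]
  rw [List.foldl_map]

-- one A-step adds the row's table name to the key set (Set.add: only if unseen)
theorem pv_step_keys (d : PySem.Dict String (List String))
    (row : String × String × List (String × Int)) :
    (pvStepA d row).keys = PySem.Set.add d.keys row.1 := by
  have hadd : PySem.Set.add d.keys row.1 = (d.insert row.1 ([] : List String)).keys := by
    by_cases h : d.contains row.1 = true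
    · rw [PySem.Dict.keys_insert_of_contains d [] h]
      simp [PySem.Set.add, PySem.Set.contains,
        (PySem.Dict.contains_iff_mem_keys d row.1).mp h]
    · have h' : d.contains row.1 = false := by simpa using h
      rw [PySem.Dict.keys_insert_of_not_contains d [] h']
      have : row.1 ∉ d.keys := fun hm => h ((PySem.Dict.contains_iff_mem_keys d row.1).mpr hm)
      simp [PySem.Set.add, PySem.Set.contains, this]
  have hd1 : (if d.contains row.1 then d else d.insert row.1 ([] : List String)).keys
      = (d.insert row.1 ([] : List String)).keys := by
    by_cases h : d.contains row.1 = true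
    · rw [if_pos h, PySem.Dict.keys_insert_of_contains d [] h]
    · rw [if_neg h]
  unfold pvStepA
  cases hpk : (PySem.Dict.ofList row.2.2).get? "PK" with
  | none => rw [hd1, hadd]
  | some pk =>
    by_cases hz : pk ≠ 0
    · simp only [if_pos hz]
      set d1 := if d.contains row.1 then d else d.insert row.1 ([] : List String) with hdd
      have hc : d1.contains row.1 = true := by
        rw [hdd]; by_cases h : d.contains row.1 = true
        · rw [if_pos h]; exact h
        · rw [if_neg h]; exact PySem.Dict.contains_insert_self d row.1 []
      rw [PySem.Dict.keys_modify, PySem.Dict.keys_insert_of_contains d1 _ hc, hd1, hadd]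
    · simp only [if_neg hz]; rw [hd1, hadd]

-- A's key list is the first-occurrence set of the table names
theorem pv_keys (l : List (String × String × List (String × Int)))
    (d : PySem.Dict String (List String)) :
    (l.foldl pvStepA d).keys = PySem.Set.update d.keys (l.map (·.1)) := by
  induction l generalizing d with
  | nil => rfl
  | cons row rest ih =>
    simp only [List.foldl_cons, List.map_cons]
    rw [ih (pvStepA d row), pv_step_keys]
    rfl

-- one A-step appends the column name exactly when the row is for table t and flagged PK
theorem pv_step_getD (d : PySem.Dict String (List String)) (t : String)
    (row : String × String × List (String × Int)) :
    (pvStepA d row).getD t [] =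
      d.getD t [] ++ (if row.1 == t && pvIsPK row then [row.2.1] else []) := by
  have hd1 : ∀ s : String, (if d.contains row.1 then d else d.insert row.1 ([] : List String)).getD s []
      = d.getD s [] := by
    intro s
    by_cases h : d.contains row.1 = true
    · rw [if_pos h]
    · have h' : d.contains row.1 = false := by simpa using h
      rw [if_neg h, PySem.Dict.getD_insert]
      by_cases ht : s = row.1
      · subst ht; rw [if_pos rfl, PySem.Dict.getD_of_not_contains d [] h']
      · rw [if_neg ht]
  unfold pvStepA pvIsPK
  cases hpk : (PySem.Dict.ofList row.2.2).get? "PK" with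
  | none => rw [hd1]; simp
  | some pk =>
    by_cases hz : pk ≠ 0
    · simp only [if_pos hz]
      rw [PySem.Dict.getD_modify]
      by_cases ht : t = row.1
      · rw [if_pos ht, hd1 row.1, ht]
        have : (row.1 == row.1 && (pk != 0)) = true := by simp [hz]
        rw [this, if_pos rfl]
      · rw [if_neg ht, hd1 t]
        have : (row.1 == t && (pk != 0)) = false := by
          simp; intro h; exact absurd h.symm ht
        rw [this]
        simp
    · have hz0 : pk = 0 := by omega
      subst hz0
      simp only [if_neg hz]
      rw [hd1]
      simp
-- A's accumulated list for table t is the column names of t's PK-flagged rows, in order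
theorem pv_getD (l : List (String × String × List (String × Int)))
    (d : PySem.Dict String (List String)) (t : String) :
    (l.foldl pvStepA d).getD t [] =
      d.getD t [] ++ (l.filter (fun row => row.1 == t && pvIsPK row)).map (fun row => row.2.1) := by
  induction l generalizing d with
  | nil => simp
  | cons row rest ih =>
    simp only [List.foldl_cons, List.filter_cons]
    rw [ih (pvStepA d row), pv_step_getD]
    by_cases h : (row.1 == t && pvIsPK row) = true
    · rw [if_pos h, h]
      simp [List.append_assoc]
    · have h' : (row.1 == t && pvIsPK row) = false := by simpa using h
      rw [h', if_neg (by simp)]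
      simp

-- ===== VERDICT (by name: the statement is the Claim_ definition above) =====
theorem get_primary_keys_spec : Claim_equal_get_primary_keys := by
  intro tcp _ _
  unfold Spec_get_primary_keys get_primary_keys get_primary_keys_alt
  -- characterise A's dict
  have hkeys : (tcp.foldl pvStepA PySem.Dict.empty).keys
      = PySem.Set.ofList (tcp.map (·.1)) := by
    rw [pv_keys]; rfl
  have hnodup : (tcp.foldl pvStepA PySem.Dict.empty).keys.Nodup := by
    rw [hkeys]; exact PySem.Set.nodup_ofList _
  rw [PySem.Dict.items_eq_map_keys _ hnodup ([] : List String), hkeys]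
  -- characterise B's dict
  have hB : (PySem.Dict.ofList ((PySem.List.dedup (tcp.map (fun row => row.1))).map (fun t =>
      (t, (tcp.filter (fun row => row.1 == t && pvIsPK row)).map (fun row => row.2.1))))).items
      = (PySem.List.dedup (tcp.map (fun row => row.1))).map (fun t =>
      (t, (tcp.filter (fun row => row.1 == t && pvIsPK row)).map (fun row => row.2.1))) := by
    have h := PySem.Dict.items_foldl_insert_fresh
      (PySem.List.dedup (tcp.map (fun row => row.1))) (fun t => t)
      (fun t => (tcp.filter (fun row => row.1 == t && pvIsPK row)).map (fun row => row.2.1))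
      PySem.Dict.empty (by intro a _; exact PySem.Dict.contains_empty a)
      (by rw [List.map_id']; exact PySem.List.nodup_dedup (tcp.map (fun row => row.1)))
    rw [pv_ofList_map]
    simp only at h
    simpa using h
  rw [hB, PySem.List.dedup_eq_ofList]
  apply List.map_congr_left
  intro t _
  rw [pv_getD]
  simp
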